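-- pv_equiv track=rewrite | github.com/pradeepmaddipatla16/my_problem_solving_approach_leetcode_medium_hard_problems | leet_code_hash_table_problems/keyboard_row.py | function
-- ===== SOURCE A (Python) =====
-- def function(list1):
--     output = []
--     buf_dict = {'up':['q','w','e','r','t','y','u','i','o','p'],
--                 'middle':['a','s','d','f','g','h','j','k','l'],
--                 'down':['z','x','c','v','b','n','m']}
--     for word in list1:
--         if all(ch in buf_dict['middle']for ch in word.lower()) or all(ch in buf_dict['up'] for ch in word.lower()) or all(ch in buf_dict['down'] for ch in word.lower()):output.append(word)
--
--     return output
-- ===== SOURCE B (Python) =====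
-- def function(list1):
--     rows = {}
--     for i, row in enumerate(["qwertyuiop", "asdfghjkl", "zxcvbnm"]):
--         for ch in row:
--             rows[ch] = i
--     output = []
--     for word in list1:
--         ids = {rows.get(ch, -1) for ch in word.lower()}
--         if len(ids) <= 1 and -1 not in ids:
--             output.append(word)
--     return output
-- ===== Notes on version B (the rewrite author's own statement) =====
-- stated objective: idiomatic
-- what changed: A tests each word with three separate all()-membership passes, each scanning a row list per character; B builds one char-to-row-id dict once and makes a single pass per word, collecting row ids (-1 for off-keyboard chars) into a set and keeping the word iff the set has at most one element and no -1.
import Mathlib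
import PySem

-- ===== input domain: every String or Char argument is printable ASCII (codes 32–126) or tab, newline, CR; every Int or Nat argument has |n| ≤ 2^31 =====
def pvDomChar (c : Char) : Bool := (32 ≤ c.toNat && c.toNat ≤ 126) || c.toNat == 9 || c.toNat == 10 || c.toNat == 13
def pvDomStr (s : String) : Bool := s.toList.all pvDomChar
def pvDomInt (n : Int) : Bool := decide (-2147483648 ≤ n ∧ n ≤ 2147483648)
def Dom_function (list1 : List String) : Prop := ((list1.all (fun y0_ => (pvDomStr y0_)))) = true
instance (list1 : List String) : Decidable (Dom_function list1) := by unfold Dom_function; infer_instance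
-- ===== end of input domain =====

-- B replaces A's three per-word all()-membership passes by a char→row-id dict built once and a
-- single per-word pass collecting row ids into a set (idiomatic; no speed claim).

-- ===== PORT A =====
def bufDict : PySem.Dict String (List Char) :=
  PySem.Dict.ofList
    [("up", ['q','w','e','r','t','y','u','i','o','p']),
     ("middle", ['a','s','d','f','g','h','j','k','l']),
     ("down", ['z','x','c','v','b','n','m'])]

def function (list1 : List String) : List String :=
  list1.foldl (fun output word =>
    if ((PySem.Str.lower word).toList.all (fun ch => (bufDict.getD "middle" []).contains ch) ||
        (PySem.Str.lower word).toList.all (fun ch => (bufDict.getD "up" []).contains ch) ||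
        (PySem.Str.lower word).toList.all (fun ch => (bufDict.getD "down" []).contains ch))
    then output ++ [word] else output) []

-- ===== PORT B =====
def bRows : PySem.Dict Char Int :=
  (PySem.List.enumerate ["qwertyuiop", "asdfghjkl", "zxcvbnm"]).foldl
    (fun d p => p.2.toList.foldl (fun d ch => d.insert ch p.1) d) PySem.Dict.empty

def function_alt (list1 : List String) : List String :=
  list1.foldl (fun output word =>
    if PySem.Set.len (PySem.Set.ofList ((PySem.Str.lower word).toList.map (fun ch => bRows.getD ch (-1)))) ≤ 1 ∧
       ¬ (PySem.Set.contains (PySem.Set.ofList ((PySem.Str.lower word).toList.map (fun ch => bRows.getD ch (-1)))) (-1) = true)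
    then output ++ [word] else output) []

-- ===== PRECONDITION & SPEC =====
def Spec_function (list1 : List String) (out : List String) : Prop := out = function_alt list1
instance (list1 : List String) (out : List String) : Decidable (Spec_function list1 out) := by unfold Spec_function; infer_instance

-- ===== CLAIM (what is proved, stated in full; the proofs are below) =====
def Claim_equal_function : Prop := ∀ (list1 : List String), Dom_function list1 → Spec_function list1 (function list1)

-- ===== LEMMAS AND PROOFS =====

def upL : List Char := ['q','w','e','r','t','y','u','i','o','p']
def midL : List Char := ['a','s','d','f','g','h','j','k','l']
def downL : List Char := ['z','x','c','v','b','n','m']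

theorem row_up (c : Char) (h : c ∈ upL) : bRows.getD c (-1) = 0 := by
  fin_cases h <;> rfl

theorem row_mid (c : Char) (h : c ∈ midL) : bRows.getD c (-1) = 1 := by
  fin_cases h <;> rfl

theorem row_down (c : Char) (h : c ∈ downL) : bRows.getD c (-1) = 2 := by
  fin_cases h <;> rfl

theorem row_none (c : Char) (h1 : c ∉ upL) (h2 : c ∉ midL) (h3 : c ∉ downL) :
    bRows.getD c (-1) = -1 := by
  cases hg : bRows.get? c with
  | none => simp [PySem.Dict.getD, hg]
  | some v =>
      exfalso
      have hmem : (c, v) ∈ bRows.items := PySem.Dict.mem_items_of_get?_eq_some _ hg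
      have hkeys : c ∈ bRows.items.map Prod.fst := List.mem_map.mpr ⟨(c, v), hmem, rfl⟩
      have heq : bRows.items.map Prod.fst = upL ++ midL ++ downL := by rfl
      rw [heq] at hkeys
      rcases List.mem_append.mp hkeys with h | h
      · rcases List.mem_append.mp h with h | h
        · exact h1 h
        · exact h2 h
      · exact h3 h

theorem row_cases (c : Char) :
    bRows.getD c (-1) = 0 ∨ bRows.getD c (-1) = 1 ∨ bRows.getD c (-1) = 2 ∨ bRows.getD c (-1) = -1 := by
  by_cases h1 : c ∈ upL
  · exact Or.inl (row_up c h1)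
  by_cases h2 : c ∈ midL
  · exact Or.inr (Or.inl (row_mid c h2))
  by_cases h3 : c ∈ downL
  · exact Or.inr (Or.inr (Or.inl (row_down c h3)))
  · exact Or.inr (Or.inr (Or.inr (row_none c h1 h2 h3)))

theorem mem_up_iff (c : Char) : c ∈ upL ↔ bRows.getD c (-1) = 0 := by
  constructor
  · exact row_up c
  · intro h
    by_contra h1
    by_cases h2 : c ∈ midL
    · rw [row_mid c h2] at h; exact absurd h (by decide)
    by_cases h3 : c ∈ downL
    · rw [row_down c h3] at h; exact absurd h (by decide)
    · rw [row_none c h1 h2 h3] at h; exact absurd h (by decide)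

theorem mem_mid_iff (c : Char) : c ∈ midL ↔ bRows.getD c (-1) = 1 := by
  constructor
  · exact row_mid c
  · intro h
    by_contra h2
    by_cases h1 : c ∈ upL
    · rw [row_up c h1] at h; exact absurd h (by decide)
    by_cases h3 : c ∈ downL
    · rw [row_down c h3] at h; exact absurd h (by decide)
    · rw [row_none c h1 h2 h3] at h; exact absurd h (by decide)

theorem mem_down_iff (c : Char) : c ∈ downL ↔ bRows.getD c (-1) = 2 := by
  constructor
  · exact row_down c
  · intro h
    by_contra h3
    by_cases h1 : c ∈ upL
    · rw [row_up c h1] at h; exact absurd h (by decide)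
    by_cases h2 : c ∈ midL
    · rw [row_mid c h2] at h; exact absurd h (by decide)
    · rw [row_none c h1 h2 h3] at h; exact absurd h (by decide)

theorem pv_all_eq {α : Type} (s : List α) (h : s.length ≤ 1) :
    ∀ a ∈ s, ∀ b ∈ s, a = b := by
  match s with
  | [] => simp
  | [x] => simp
  | x :: y :: t => simp at h

theorem pv_len_le_one {α : Type} (s : List α) (hn : s.Nodup) (h : ∀ a ∈ s, ∀ b ∈ s, a = b) :
    s.length ≤ 1 := by
  match s, hn with
  | [], _ => simp
  | [x], _ => simp
  | x :: y :: t, hn =>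
      exfalso
      have hxy : x = y := h x (by simp) y (by simp)
      rw [List.nodup_cons] at hn
      exact hn.1 (hxy ▸ List.mem_cons_self ..)

theorem acond_iff (l : List Char) :
    (l.all (fun ch => midL.contains ch) || l.all (fun ch => upL.contains ch) ||
     l.all (fun ch => downL.contains ch)) = true ↔
    ((∀ c ∈ l, c ∈ midL) ∨ (∀ c ∈ l, c ∈ upL) ∨ (∀ c ∈ l, c ∈ downL)) := by
  simp [List.all_eq_true]
  tauto

theorem main_cond (l : List Char) :
    (l.all (fun ch => midL.contains ch) || l.all (fun ch => upL.contains ch) ||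
     l.all (fun ch => downL.contains ch)) = true ↔
    (PySem.Set.len (PySem.Set.ofList (l.map (fun ch => bRows.getD ch (-1)))) ≤ 1 ∧
     ¬ (PySem.Set.contains (PySem.Set.ofList (l.map (fun ch => bRows.getD ch (-1)))) (-1) = true)) := by
  have hmemS : ∀ x : Int, x ∈ PySem.Set.ofList (l.map (fun ch => bRows.getD ch (-1))) ↔
      ∃ c ∈ l, bRows.getD c (-1) = x := by
    intro x
    rw [PySem.Set.mem_ofList, List.mem_map]
  have hlen : PySem.Set.len (PySem.Set.ofList (l.map (fun ch => bRows.getD ch (-1)))) ≤ 1 ↔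
      (PySem.Set.ofList (l.map (fun ch => bRows.getD ch (-1)))).length ≤ 1 := by
    simp [PySem.Set.len]
  rw [acond_iff, hlen]
  constructor
  · intro h
    have hconst : ∃ r : Int, r ≠ -1 ∧ ∀ c ∈ l, bRows.getD c (-1) = r := by
      rcases h with h | h | h
      · exact ⟨1, by decide, fun c hc => row_mid c (h c hc)⟩
      · exact ⟨0, by decide, fun c hc => row_up c (h c hc)⟩
      · exact ⟨2, by decide, fun c hc => row_down c (h c hc)⟩
    obtain ⟨r, hr, hall⟩ := hconst
    constructor
    · apply pv_len_le_one _ (PySem.Set.nodup_ofList _)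
      intro a ha b hb
      obtain ⟨c, hc, he⟩ := (hmemS a).mp ha
      obtain ⟨c', hc', he'⟩ := (hmemS b).mp hb
      rw [← he, ← he', hall c hc, hall c' hc']
    · intro hcont
      obtain ⟨c, hc, he⟩ := (hmemS _).mp ((PySem.Set.contains_iff _ _).mp hcont)
      rw [hall c hc] at he
      exact hr he
  · rintro ⟨h1, h2⟩
    have hne : ∀ c ∈ l, bRows.getD c (-1) ≠ -1 := by
      intro c hc he
      exact h2 ((PySem.Set.contains_iff _ _).mpr ((hmemS _).mpr ⟨c, hc, he⟩))
    have hall : ∀ a ∈ l, ∀ b ∈ l, bRows.getD a (-1) = bRows.getD b (-1) := by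
      intro a ha b hb
      exact pv_all_eq _ h1 _ ((hmemS _).mpr ⟨a, ha, rfl⟩) _ ((hmemS _).mpr ⟨b, hb, rfl⟩)
    cases l with
    | nil => simp
    | cons c rest =>
        have hcmem : c ∈ c :: rest := List.mem_cons_self ..
        rcases row_cases c with h | h | h | h
        · refine Or.inr (Or.inl ?_)
          intro d hd
          exact (mem_up_iff d).mpr ((hall d hd c hcmem).trans h)
        · refine Or.inl ?_
          intro d hd
          exact (mem_mid_iff d).mpr ((hall d hd c hcmem).trans h)
        · refine Or.inr (Or.inr ?_)
          intro d hd
          exact (mem_down_iff d).mpr ((hall d hd c hcmem).trans h)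
        · exact absurd h (hne c hcmem)

theorem funs_eq (l : List String) : function l = function_alt l := by
  unfold function function_alt
  induction l using List.reverseRecOn with
  | nil => rfl
  | append_singleton xs x ih =>
      simp only [List.foldl_append, List.foldl_cons, List.foldl_nil]
      rw [ih]
      have hm : bufDict.getD "middle" [] = midL := by rfl
      have hu : bufDict.getD "up" [] = upL := by rfl
      have hd : bufDict.getD "down" [] = downL := by rfl
      rw [hm, hu, hd]
      by_cases h : ((PySem.Str.lower x).toList.all (fun ch => midL.contains ch) ||
          (PySem.Str.lower x).toList.all (fun ch => upL.contains ch) ||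
          (PySem.Str.lower x).toList.all (fun ch => downL.contains ch)) = true
      · rw [if_pos h, if_pos ((main_cond _).mp h)]
      · rw [if_neg h, if_neg (fun hb => h ((main_cond _).mpr hb))]

-- ===== VERDICT (by name: the statement is the Claim_ definition above) =====
theorem function_spec : Claim_equal_function := fun l _ => funs_eq l
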